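-- pv_equiv track=rewrite | github.com/ValenTiss/Trabajo_practico01 | main.py | menores
-- ===== SOURCE A (Python) =====
-- def menores(valor,lista, contador,lista_menores):
--   """
--   Crea una lista con los valores mayores a un valor dado
--   parametro 1: Número con el cual se comparan los números de la lista
--   parametro 2: Lista de la cual se desea comparar cada número con valor
--   parametro 3: Cuenta la cantidad de iteraciones, sirve para determinar el indice del valor a comparar
--   parametro 4: Lista que almacenará los valores de la lista que son mayores que el el número que se recibe en la primer entrada de la función
--   Return: Lista con los valores de la lista mayores a valor
--   """
--   #Si la lista está vacía o tiene un solo elemento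
--   if len(lista)>1 :
--     #Si no se ha evaluado el último elemento de la lista
--     if len(lista)>1 and contador!=len(lista):
--       #Si el número de la lista es menor que valor
--       if valor >lista[contador]:
--         #Agrega el número menor al final de la lista que contiene los números menores
--         lista_menores.append(lista[contador])
--         contador+=1
--         #Llamado recursivo
--         return menores(valor,lista, contador, lista_menores)
--       #El número de la lista es menor a valor
--       else:
--         contador+=1
--         return menores(valor,lista, contador, lista_menores)
--     #Se recorrió toda la lista
--     else:
--       return lista_menores
--   #Si el único valor de la lista es mayor a valor
--   elif lista[0]<valor:
--     return lista
--   #La lista está vacía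
--   else:
--       return[]
-- ===== SOURCE B (Python) =====
-- def menores(valor, lista, contador, lista_menores):
--     # Iterative filter: one explicit index loop instead of A's recursion
--     # that re-passes the whole argument tuple on every element.
--     if len(lista) > 1:
--         for i in range(contador, len(lista)):
--             if lista[i] < valor:
--                 lista_menores.append(lista[i])
--         return lista_menores
--     elif lista[0] < valor:
--         return lista
--     else:
--         return []
-- ===== Notes on version B (the rewrite author's own statement) =====
-- stated objective: simpler
-- what changed: Replaces A's element-by-element recursion (which re-passes the whole argument tuple per element) by a single explicit index loop appending to the accumulator.
import Mathlib
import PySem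

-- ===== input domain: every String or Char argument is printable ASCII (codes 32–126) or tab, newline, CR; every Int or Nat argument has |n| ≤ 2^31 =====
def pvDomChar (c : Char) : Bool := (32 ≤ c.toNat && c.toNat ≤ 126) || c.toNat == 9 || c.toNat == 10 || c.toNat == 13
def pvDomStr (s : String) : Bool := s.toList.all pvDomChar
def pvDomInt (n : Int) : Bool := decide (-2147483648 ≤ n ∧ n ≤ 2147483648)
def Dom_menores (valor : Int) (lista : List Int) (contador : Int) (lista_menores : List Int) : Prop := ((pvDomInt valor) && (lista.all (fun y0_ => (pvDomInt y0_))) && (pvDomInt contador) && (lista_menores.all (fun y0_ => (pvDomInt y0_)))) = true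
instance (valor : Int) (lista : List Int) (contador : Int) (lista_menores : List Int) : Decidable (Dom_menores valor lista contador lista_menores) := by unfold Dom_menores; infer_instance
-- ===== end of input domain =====

-- B replaces A's element-by-element recursion by a single explicit index loop (simpler; same
-- return value; the Python versions mutate lista_menores — equivalence here is about the return value).

-- termination helper for port A (cited by name in decreasing_by)
theorem pv_lt_of_pyGet?_some {x : Int} (lista : List Int) (i : Int)
    (h : PySem.List.pyGet? lista i = some x) : i < (lista.length : Int) := by
  by_contra hij
  rw [(PySem.List.pyGet?_eq_none_iff (xs := lista) (i := i)).2 (by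
    simp [PySem.Raise.InRange]; omega)] at h
  simp at h

-- ===== PORT A =====
def menores (valor : Int) (lista : List Int) (contador : Int) (lista_menores : List Int) : List Int :=
  if 1 < lista.length then
    if contador ≠ (lista.length : Int) then
      match h : PySem.List.pyGet? lista contador with
      | some x =>
        if valor > x then
          menores valor lista (contador + 1) (lista_menores ++ [x])
        else
          menores valor lista (contador + 1) lista_menores
      | none => []   -- lista[contador] IndexError; excluded by Pre_
    else lista_menores
  else
    match PySem.List.pyGet? lista 0 with
    | some x => if x < valor then lista else []
    | none => []     -- lista[0] on empty list: IndexError; excluded by Pre_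
termination_by ((lista.length : Int) - contador).toNat
decreasing_by
  · have := pv_lt_of_pyGet?_some lista contador h; omega
  · have := pv_lt_of_pyGet?_some lista contador h; omega

-- ===== PORT B =====
def menores_alt (valor : Int) (lista : List Int) (contador : Int) (lista_menores : List Int) : List Int :=
  if 1 < lista.length then
    (PySem.List.pyRange contador (lista.length : Int) 1).foldl
      (fun acc i =>
        match PySem.List.pyGet? lista i with
        | some x => if x < valor then acc ++ [x] else acc
        | none => acc)   -- unreachable inside Pre_
      lista_menores
  else
    match PySem.List.pyGet? lista 0 with
    | some x => if x < valor then lista else []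
    | none => []

-- ===== PRECONDITION & SPEC =====
-- Pre_ excludes exactly the inputs on which Python A raises IndexError: the empty list
-- (lista[0]), and longer lists with contador outside [-len, len] (lista[contador]).
def Pre_menores (valor : Int) (lista : List Int) (contador : Int) (lista_menores : List Int) : Prop :=
  lista.length = 1 ∨
    (1 < lista.length ∧ -(lista.length : Int) ≤ contador ∧ contador ≤ (lista.length : Int))
instance (valor : Int) (lista : List Int) (contador : Int) (lista_menores : List Int) : Decidable (Pre_menores valor lista contador lista_menores) := by unfold Pre_menores; infer_instance
def pvWitness_menores : Int × List Int × Int × List Int := (5, [1, 7, 3], 0, [])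

def Spec_menores (valor : Int) (lista : List Int) (contador : Int) (lista_menores : List Int) (out : List Int) : Prop := out = menores_alt valor lista contador lista_menores
instance (valor : Int) (lista : List Int) (contador : Int) (lista_menores : List Int) (out : List Int) : Decidable (Spec_menores valor lista contador lista_menores out) := by unfold Spec_menores; infer_instance

-- ===== CLAIM (what is proved, stated in full; the proofs are below) =====
def Claim_equal_menores : Prop := ∀ (valor : Int) (lista : List Int) (contador : Int) (lista_menores : List Int), Dom_menores valor lista contador lista_menores → Pre_menores valor lista contador lista_menores → Spec_menores valor lista contador lista_menores (menores valor lista contador lista_menores)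

-- ===== LEMMAS AND PROOFS =====

-- A's recursion from index `contador` equals B's fold over range(contador, len).
theorem menores_loop_eq (valor : Int) (lista : List Int) :
    ∀ (n : Nat) (contador : Int) (lm : List Int),
      (((lista.length : Int) - contador).toNat = n) →
      -(lista.length : Int) ≤ contador → contador ≤ (lista.length : Int) →
      1 < lista.length →
      menores valor lista contador lm =
        (PySem.List.pyRange contador (lista.length : Int) 1).foldl
          (fun acc i =>
            match PySem.List.pyGet? lista i with
            | some x => if x < valor then acc ++ [x] else acc
            | none => acc) lm := by
  intro n
  induction n with
  | zero =>
      intro contador lm hn hlo hhi hlen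
      have hc : contador = (lista.length : Int) := by omega
      rw [menores]
      simp [hlen, hc, PySem.List.pyRange_one_eq_nil (le_refl _)]
  | succ n ih =>
      intro contador lm hn hlo hhi hlen
      have hlt : contador < (lista.length : Int) := by omega
      rw [PySem.List.pyRange_one_cons hlt, List.foldl_cons, menores]
      have hne : contador ≠ (lista.length : Int) := by omega
      simp only [hlen, if_pos, hne, ne_eq, not_false_eq_true]
      cases hget : PySem.List.pyGet? lista contador with
      | none =>
          exfalso
          rw [(PySem.List.pyGet?_eq_none_iff (xs := lista) (i := contador))] at hget
          exact hget (by simp [PySem.Raise.InRange]; omega)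
      | some x =>
          by_cases hx : x < valor
          · simp only [gt_iff_lt, hx, if_true]
            exact ih (contador + 1) (lm ++ [x]) (by omega) (by omega) (by omega) hlen
          · simp only [gt_iff_lt, hx, if_false]
            exact ih (contador + 1) lm (by omega) (by omega) (by omega) hlen

-- ===== VERDICT (by name: the statement is the Claim_ definition above) =====
theorem menores_spec : Claim_equal_menores := by
  intro valor lista contador lista_menores _ hpre
  unfold Spec_menores menores_alt
  rcases hpre with h1 | ⟨hlen, hlo, hhi⟩
  · have hnl : ¬ (1 < lista.length) := by omega
    rw [menores]
    simp [hnl]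
  · simp only [hlen, if_pos]
    exact menores_loop_eq valor lista _ contador lista_menores rfl hlo hhi hlen
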